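-- pv_equiv track=rewrite | github.com/simple0710/BOJ | silver/[19941] 햄버거 분배.py | solution1
-- ===== SOURCE A (Python) =====
-- import sys, heapq
--
-- def solution1(N, K, place):
--   res = 0
--   hamburger = []
--   people = []
--   # 사람이 있는 위치와 행범거가 있는 위치를 저장
--   for i in range(N):
--     heapq.heappush(hamburger if place[i] == 'H' else people, i)
--
--   # 사람과 햄버거의 위치를 비교한다.
--   while people: # 사람이 아직 있는 경우
--     pv = heapq.heappop(people)
--     while hamburger: # 햄버거가 있는 경우
--       hv = heapq.heappop(hamburger)
--       if hv - pv > K: # 범위 내에 햄버거가 없는 경우 다음 사람을 확인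
--         heapq.heappush(hamburger, hv) # 범위 밖의 값을 반환했으니 다시 추가
--         break
--       elif abs(pv - hv) <= K: # 범위 내에 햄버거가 있는 경우 정답 갱신
--         res += 1
--         break
--   return res # 햄버거를 먹을 수 있는 사람의 수 반환
-- ===== SOURCE B (Python) =====
-- def solution1(N, K, place):
--     # One interleaved left-to-right scan over the positions: each position either
--     # matches the earliest still-reachable pending opposite kind, or waits itself.
--     res = 0
--     waitP = []  # pending (unmatched) people positions
--     waitH = []  # pending (unmatched) hamburger positions
--     for i in range(N):
--         if place[i] == 'H':
--             while waitP and i - waitP[0] > K: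
--                 waitP.pop(0)
--             if waitP:
--                 waitP.pop(0)
--                 res += 1
--             else:
--                 waitH.append(i)
--         else:
--             while waitH and i - waitH[0] > K:
--                 waitH.pop(0)
--             if waitH:
--                 waitH.pop(0)
--                 res += 1
--             else:
--                 waitP.append(i)
--     return res
-- ===== Notes on version B (the rewrite author's own statement) =====
-- stated objective: faster
-- what changed: Instead of splitting positions into two heaps and then running a people-driven matching loop with pop/push-back, B makes one interleaved left-to-right pass over the string, matching each arriving position against a lazily pruned queue of pending opposite-kind positions.
import Mathlib
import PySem

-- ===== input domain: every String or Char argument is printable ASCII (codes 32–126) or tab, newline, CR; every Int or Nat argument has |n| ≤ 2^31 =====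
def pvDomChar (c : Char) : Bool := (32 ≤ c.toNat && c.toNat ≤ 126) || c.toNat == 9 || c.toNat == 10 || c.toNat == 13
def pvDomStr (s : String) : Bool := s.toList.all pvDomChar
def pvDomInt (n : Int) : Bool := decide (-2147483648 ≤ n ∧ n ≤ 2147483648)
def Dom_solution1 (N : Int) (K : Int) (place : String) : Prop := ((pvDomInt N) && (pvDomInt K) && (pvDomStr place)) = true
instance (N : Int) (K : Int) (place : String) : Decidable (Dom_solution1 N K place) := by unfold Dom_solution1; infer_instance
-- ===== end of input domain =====

-- B replaces A's split-into-two-heaps, people-driven matching with ONE interleaved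
-- left-to-right scan over the positions, matching each arrival against a lazy queue
-- of pending opposites (objective: faster, no heap operations, single pass).


-- ===== PORT A =====
-- heapq on a list of ints, modelled value-faithfully as a sorted list:
-- heappush = insert at sorted position, heappop = take the head (the minimum).
def heapPushA (x : Int) : List Int → List Int
  | [] => [x]
  | y :: t => if x < y then x :: y :: t else y :: heapPushA x t

-- the inner `while hamburger:` loop: returns (res increment, remaining heap)
def innerA (K pv : Int) : List Int → Int × List Int
  | [] => (0, [])
  | hv :: rest =>
    if hv - pv > K then (0, heapPushA hv rest)        -- push back and break
    else if |pv - hv| ≤ K then (1, rest)              -- match and break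
    else innerA K pv rest                              -- discard, continue

-- the outer `while people:` loop
def outerA (K : Int) : List Int → List Int → Int
  | [], _ => 0
  | pv :: ps, hamburger =>
    let r := innerA K pv hamburger
    r.1 + outerA K ps r.2

-- for i in range(N): heappush(hamburger if place[i]=='H' else people, i)
def buildHeapsA (N : Int) (place : String) : List Int × List Int :=
  (PySem.List.pyRange 0 N 1).foldl
    (fun (hp : List Int × List Int) i =>
      if PySem.Str.pyGet? place i == some 'H' then (heapPushA i hp.1, hp.2)
      else (hp.1, heapPushA i hp.2)) ([], [])

def solution1 (N : Int) (K : Int) (place : String) : Int :=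
  outerA K (buildHeapsA N place).2 (buildHeapsA N place).1

-- ===== PORT B =====
-- the `while wait and i - wait[0] > K: wait.pop(0)` loop
def pruneB (K i : Int) : List Int → List Int
  | [] => []
  | x :: rest => if i - x > K then pruneB K i rest else x :: rest

-- one iteration of B's single scan; state = (res, waitP, waitH)
def stepScanB (K : Int) (isH : Int → Bool) (st : Int × List Int × List Int) (i : Int) :
    Int × List Int × List Int :=
  if isH i then
    match pruneB K i st.2.1 with
    | [] => (st.1, [], st.2.2 ++ [i])                 -- no reachable person: i waits
    | _ :: rest => (st.1 + 1, rest, st.2.2)           -- match earliest pending person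
  else
    match pruneB K i st.2.2 with
    | [] => (st.1, st.2.1 ++ [i], [])                 -- no reachable hamburger: i waits
    | _ :: rest => (st.1 + 1, st.2.1, rest)           -- match earliest pending hamburger

def solution1_alt (N : Int) (K : Int) (place : String) : Int :=
  ((PySem.List.pyRange 0 N 1).foldl
    (stepScanB K (fun i => PySem.Str.pyGet? place i == some 'H')) (0, [], [])).1

-- ===== PRECONDITION & SPEC =====
-- A raises IndexError on place[i] when N exceeds the length of place; excluded (B raises there too).
def Pre_solution1 (N : Int) (K : Int) (place : String) : Prop :=
  N ≤ (place.toList.length : Int)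
instance (N : Int) (K : Int) (place : String) : Decidable (Pre_solution1 N K place) := by
  unfold Pre_solution1; infer_instance

def pvWitness_solution1 : Int × Int × String := (5, 1, "HPHHP")

def Spec_solution1 (N : Int) (K : Int) (place : String) (out : Int) : Prop := out = solution1_alt N K place
instance (N : Int) (K : Int) (place : String) (out : Int) : Decidable (Spec_solution1 N K place out) := by unfold Spec_solution1; infer_instance

-- ===== CLAIM (what is proved, stated in full; the proofs are below) =====
def Claim_equal_solution1 : Prop := ∀ (N : Int) (K : Int) (place : String), Dom_solution1 N K place → Pre_solution1 N K place → Spec_solution1 N K place (solution1 N K place)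

-- ===== LEMMAS AND PROOFS =====

-- pushing an element larger than everything in the heap appends it
theorem heapPushA_append (x : Int) (l : List Int) (h : ∀ y ∈ l, ¬ x < y) :
    heapPushA x l = l ++ [x] := by
  induction l with
  | nil => rfl
  | cons y t ih =>
    simp only [heapPushA]
    rw [if_neg (h y (by simp))]
    simp [ih (fun z hz => h z (by simp [hz]))]

-- pushing an element smaller than everything in the heap prepends it
theorem heapPushA_cons (x : Int) (l : List Int) (h : ∀ y ∈ l, x < y) :
    heapPushA x l = x :: l := by
  cases l with
  | nil => rfl
  | cons y t => simp only [heapPushA]; rw [if_pos (h y (by simp))]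

-- the heap-building fold produces the two filtered (sorted) position lists
theorem buildA_eq (isH : Int → Bool) : ∀ (r : List Int), r.Pairwise (· < ·) →
    ∀ (h p : List Int), (∀ a ∈ h, ∀ b ∈ r, a < b) → (∀ a ∈ p, ∀ b ∈ r, a < b) →
    r.foldl (fun (hp : List Int × List Int) i =>
        if isH i then (heapPushA i hp.1, hp.2) else (hp.1, heapPushA i hp.2)) (h, p)
      = (h ++ r.filter isH, p ++ r.filter (fun i => !isH i)) := by
  intro r
  induction r with
  | nil => intro _ h p _ _; simp
  | cons i r ih =>
    intro hsort h p hh hp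
    rw [List.pairwise_cons] at hsort
    have hmem : ∀ (q : List Int), (∀ a ∈ q, ∀ b ∈ i :: r, a < b) →
        heapPushA i q = q ++ [i] := fun q hq =>
      heapPushA_append i q (fun y hy => not_lt.mpr (le_of_lt (hq y hy i (by simp))))
    have hnext : ∀ (q : List Int), (∀ a ∈ q, ∀ b ∈ i :: r, a < b) →
        (∀ a ∈ q ++ [i], ∀ b ∈ r, a < b) := by
      intro q hq a ha b hb
      rcases List.mem_append.mp ha with h1 | h1
      · exact hq a h1 b (by simp [hb])
      · simp at h1; subst h1; exact hsort.1 b hb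
    have hkeep : ∀ (q : List Int), (∀ a ∈ q, ∀ b ∈ i :: r, a < b) →
        (∀ a ∈ q, ∀ b ∈ r, a < b) := fun q hq a ha b hb => hq a ha b (by simp [hb])
    simp only [List.foldl_cons]
    by_cases hi : isH i
    · rw [if_pos hi, hmem h hh, ih hsort.2 _ _ (hnext h hh) (hkeep p hp)]
      simp [hi, List.append_assoc]
    · rw [if_neg hi, hmem p hp, ih hsort.2 _ _ (hkeep h hh) (hnext p hp)]
      simp [hi, List.append_assoc]

-- with an empty heap nobody can be matched
theorem outerA_hs_nil (K : Int) (ps : List Int) : outerA K ps [] = 0 := by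
  induction ps with
  | nil => rfl
  | cons p ps ih => simp [outerA, innerA, ih]

-- with a negative K the inner loop can never match
theorem innerA_fst_neg (K pv : Int) (hK : K < 0) (hs : List Int) : (innerA K pv hs).1 = 0 := by
  induction hs with
  | nil => rfl
  | cons hv rest ih =>
    simp only [innerA]
    split_ifs with h1 h2
    · rfl
    · exact absurd (lt_of_lt_of_le hK (le_trans (abs_nonneg _) h2)) (lt_irrefl K)
    · exact ih

theorem outerA_neg (K : Int) (hK : K < 0) : ∀ ps hs : List Int, outerA K ps hs = 0 := by
  intro ps
  induction ps with
  | nil => intro hs; rfl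
  | cons p ps ih => intro hs; simp [outerA, innerA_fst_neg K p hK, ih]

-- pruneB splits off a stale prefix
theorem pruneB_split (K i : Int) : ∀ l : List Int,
    ∃ st, l = st ++ pruneB K i l ∧ ∀ x ∈ st, i - x > K := by
  intro l
  induction l with
  | nil => exact ⟨[], rfl, by simp⟩
  | cons x rest ih =>
    by_cases hx : i - x > K
    · obtain ⟨st, he, hst⟩ := ih
      refine ⟨x :: st, ?_, ?_⟩
      · simp only [pruneB, if_pos hx]; simp [← he]
      · intro y hy; rcases List.mem_cons.mp hy with h | h
        · subst h; exact hx
        · exact hst y h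
    · exact ⟨[], by simp [pruneB, hx], by simp⟩

-- the head surviving pruneB is within reach
theorem pruneB_head (K i x : Int) (t : List Int) : ∀ l, pruneB K i l = x :: t → i - x ≤ K := by
  intro l
  induction l with
  | nil => intro h; exact absurd h (by simp [pruneB])
  | cons y rest ih =>
    simp only [pruneB]
    split_ifs with hy
    · exact ih
    · intro h; cases h; omega

-- person i discards all stale hamburgers (ones more than K to its left)
theorem innerA_drop_stale (K i : Int) (hK : 0 ≤ K) :
    ∀ (st hs : List Int), (∀ h ∈ st, i - h > K) →
    innerA K i (st ++ hs) = innerA K i hs := by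
  intro st
  induction st with
  | nil => intro hs _; rfl
  | cons h t ih =>
    intro hs hst
    have hh : i - h > K := hst h (by simp)
    have h1 : ¬ h - i > K := by omega
    have h2 : ¬ |i - h| ≤ K := by rw [abs_le]; omega
    simp only [List.cons_append, innerA, if_neg h1, if_neg h2]
    exact ih hs (fun x hx => hst x (by simp [hx]))

-- stale people (more than K left of the next hamburger i) consume nothing
theorem outerA_drop_stale_people (K i : Int) (fh : List Int) (hfh : ∀ h ∈ fh, i < h) :
    ∀ (st ps : List Int), (∀ p ∈ st, i - p > K) →
    outerA K (st ++ ps) (i :: fh) = outerA K ps (i :: fh) := by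
  intro st
  induction st with
  | nil => intro ps _; rfl
  | cons p t ih =>
    intro ps hst
    have hp : i - p > K := hst p (by simp)
    simp only [List.cons_append, outerA, innerA, if_pos (show i - p > K by omega)]
    rw [heapPushA_cons i fh hfh]
    simpa using ih ps (fun x hx => hst x (by simp [hx]))

-- MAIN INVARIANT (K ≥ 0): B's single scan computes exactly what A's greedy
-- computes on the pending queues prepended to the remaining filtered positions.
theorem scanB_eq (K : Int) (hK : 0 ≤ K) (isH : Int → Bool) :
    ∀ (r : List Int) (res : Int) (wp wh : List Int),
    r.Pairwise (· < ·) →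
    (∀ x ∈ wp, ∀ i ∈ r, x < i) → (∀ x ∈ wh, ∀ i ∈ r, x < i) →
    (wp = [] ∨ wh = []) →
    (r.foldl (stepScanB K isH) (res, wp, wh)).1
      = res + outerA K (wp ++ r.filter (fun i => !isH i)) (wh ++ r.filter isH) := by
  intro r
  induction r with
  | nil =>
    intro res wp wh _ _ _ hOr
    rcases hOr with h | h <;> subst h <;> simp [outerA, outerA_hs_nil]
  | cons i r ih =>
    intro res wp wh hsort hwp hwh hOr
    rw [List.pairwise_cons] at hsort
    have hir : ∀ x ∈ r, i < x := hsort.1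
    have hfhmem : ∀ h ∈ r.filter isH, i < h := fun h hh => hir h (List.mem_of_mem_filter hh)
    obtain ⟨stP, heP, hstP⟩ := pruneB_split K i wp
    obtain ⟨stH, heH, hstH⟩ := pruneB_split K i wh
    simp only [List.foldl_cons]
    by_cases hi : isH i
    · -- a hamburger arrives at i
      have hfil1 : (i :: r).filter (fun j => !isH j) = r.filter (fun j => !isH j) := by
        simp [hi]
      have hfil2 : (i :: r).filter isH = i :: r.filter isH := by simp [hi]
      rw [hfil1, hfil2]
      rcases hp : pruneB K i wp with _ | ⟨p0, rest⟩
      · -- no reachable pending person: i joins waitH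
        have hstep : stepScanB K isH (res, wp, wh) i = (res, [], wh ++ [i]) := by
          simp [stepScanB, hi, hp]
        have hb : ∀ x ∈ wh ++ [i], ∀ j ∈ r, x < j := by
          intro x hx j hj
          rcases List.mem_append.mp hx with h | h
          · exact hwh x h j (List.mem_cons_of_mem i hj)
          · simp at h; subst h; exact hir j hj
        rw [hstep, ih res [] (wh ++ [i]) hsort.2 (by simp) hb (Or.inl rfl)]
        have hwpst : wp = stP := by rw [hp, List.append_nil] at heP; exact heP
        rcases hOr with hwpe | hwhe
        · rw [hwpe]
          simp [List.append_assoc]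
        · rw [hwhe, hwpst]
          simp only [List.nil_append, List.singleton_append]
          rw [outerA_drop_stale_people K i (r.filter isH) hfhmem stP
            (r.filter (fun j => !isH j)) hstP]
      · -- match the earliest pending person p0
        have hstep : stepScanB K isH (res, wp, wh) i = (res + 1, rest, wh) := by
          simp [stepScanB, hi, hp]
        have hwhe : wh = [] := by
          rcases hOr with h | h
          · exfalso; rw [h] at hp; simp [pruneB] at hp
          · exact h
        have hrestwp : ∀ x ∈ rest, x ∈ wp := by
          intro x hx
          rw [heP, hp]
          exact List.mem_append_right _ (List.mem_cons_of_mem _ hx)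
        have hrest : ∀ x ∈ rest, ∀ j ∈ r, x < j := fun x hx j hj =>
          hwp x (hrestwp x hx) j (List.mem_cons_of_mem i hj)
        rw [hstep, hwhe, ih (res + 1) rest [] hsort.2 hrest (by simp) (Or.inr rfl)]
        have hp0wp : p0 ∈ wp := by
          rw [heP, hp]; exact List.mem_append_right _ (List.mem_cons_self)
        have hp0i : p0 < i := hwp p0 hp0wp i (List.mem_cons_self)
        have hp0K : i - p0 ≤ K := pruneB_head K i p0 rest wp hp
        rw [heP, hp, List.append_assoc, List.cons_append]
        simp only [List.nil_append]
        rw [outerA_drop_stale_people K i (r.filter isH) hfhmem stP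
          (p0 :: (rest ++ r.filter (fun j => !isH j))) hstP]
        have hinner : innerA K p0 (i :: r.filter isH) = (1, r.filter isH) := by
          simp only [innerA, if_neg (show ¬ i - p0 > K by omega),
            if_pos (show |p0 - i| ≤ K by rw [abs_le]; omega)]
        simp only [outerA, hinner]
        ring
    · -- a person arrives at i
      have hfil1 : (i :: r).filter (fun j => !isH j) = i :: r.filter (fun j => !isH j) := by
        simp [hi]
      have hfil2 : (i :: r).filter isH = r.filter isH := by simp [hi]
      rw [hfil1, hfil2]
      rcases hp : pruneB K i wh with _ | ⟨h0, restH⟩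
      · -- no reachable pending hamburger: i joins waitP
        have hstep : stepScanB K isH (res, wp, wh) i = (res, wp ++ [i], []) := by
          simp [stepScanB, hi, hp]
        have hb : ∀ x ∈ wp ++ [i], ∀ j ∈ r, x < j := by
          intro x hx j hj
          rcases List.mem_append.mp hx with h | h
          · exact hwp x h j (List.mem_cons_of_mem i hj)
          · simp at h; subst h; exact hir j hj
        rw [hstep, ih res (wp ++ [i]) [] hsort.2 hb (by simp) (Or.inr rfl)]
        have hwhst : wh = stH := by rw [hp, List.append_nil] at heH; exact heH
        rcases hOr with hwpe | hwhe
        · rw [hwpe, hwhst]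
          simp only [List.nil_append, List.singleton_append]
          have : outerA K (i :: r.filter (fun j => !isH j)) (stH ++ r.filter isH)
              = outerA K (i :: r.filter (fun j => !isH j)) (r.filter isH) := by
            simp only [outerA, innerA_drop_stale K i hK stH (r.filter isH) hstH]
          rw [this]
        · rw [hwhe]
          simp [List.append_assoc]
      · -- match the earliest pending hamburger h0
        have hstep : stepScanB K isH (res, wp, wh) i = (res + 1, wp, restH) := by
          simp [stepScanB, hi, hp]
        have hwpe : wp = [] := by
          rcases hOr with h | h
          · exact h
          · exfalso; rw [h] at hp; simp [pruneB] at hp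
        have hrestwh : ∀ x ∈ restH, x ∈ wh := by
          intro x hx
          rw [heH, hp]
          exact List.mem_append_right _ (List.mem_cons_of_mem _ hx)
        have hrest : ∀ x ∈ restH, ∀ j ∈ r, x < j := fun x hx j hj =>
          hwh x (hrestwh x hx) j (List.mem_cons_of_mem i hj)
        rw [hstep, hwpe, ih (res + 1) [] restH hsort.2 (by simp) hrest (Or.inl rfl)]
        have hh0wh : h0 ∈ wh := by
          rw [heH, hp]; exact List.mem_append_right _ (List.mem_cons_self)
        have hh0i : h0 < i := hwh h0 hh0wh i (List.mem_cons_self)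
        have hh0K : i - h0 ≤ K := pruneB_head K i h0 restH wh hp
        rw [heH, hp, List.append_assoc, List.cons_append]
        simp only [List.nil_append]
        have hinner : innerA K i (stH ++ (h0 :: (restH ++ r.filter isH)))
            = (1, restH ++ r.filter isH) := by
          rw [innerA_drop_stale K i hK stH _ hstH]
          simp only [innerA, if_neg (show ¬ h0 - i > K by omega),
            if_pos (show |i - h0| ≤ K by rw [abs_le]; omega)]
        simp only [outerA, hinner]
        ring
    
-- negative K: B's scan never matches either
theorem scanB_neg (K : Int) (hK : K < 0) (isH : Int → Bool) :
    ∀ (r : List Int) (res : Int) (wp wh : List Int),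
    r.Pairwise (· < ·) →
    (∀ x ∈ wp, ∀ i ∈ r, x < i) → (∀ x ∈ wh, ∀ i ∈ r, x < i) →
    (r.foldl (stepScanB K isH) (res, wp, wh)).1 = res := by
  intro r
  induction r with
  | nil => intro res wp wh _ _ _; rfl
  | cons i r ih =>
    intro res wp wh hsort hwp hwh
    rw [List.pairwise_cons] at hsort
    have hir : ∀ x ∈ r, i < x := hsort.1
    have hkill : ∀ (w : List Int), (∀ x ∈ w, x < i) → pruneB K i w = [] := by
      intro w hw
      rcases hp : pruneB K i w with _ | ⟨x, t⟩
      · rfl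
      · exfalso
        obtain ⟨st, he, _⟩ := pruneB_split K i w
        have hxw : x ∈ w := by rw [he, hp]; exact List.mem_append_right _ List.mem_cons_self
        have := pruneB_head K i x t w hp
        have := hw x hxw
        omega
    have hnew : ∀ (w : List Int), (∀ x ∈ w, ∀ j ∈ i :: r, x < j) →
        (∀ x ∈ w ++ [i], ∀ j ∈ r, x < j) := by
      intro w hw x hx j hj
      rcases List.mem_append.mp hx with h | h
      · exact hw x h j (List.mem_cons_of_mem i hj)
      · simp at h; subst h; exact hir j hj
    simp only [List.foldl_cons]
    by_cases hi : isH i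
    · have hstep : stepScanB K isH (res, wp, wh) i = (res, [], wh ++ [i]) := by
        simp [stepScanB, hi, hkill wp (fun x hx => hwp x hx i List.mem_cons_self)]
      rw [hstep]
      exact ih res [] (wh ++ [i]) hsort.2 (by simp) (hnew wh hwh)
    · have hstep : stepScanB K isH (res, wp, wh) i = (res, wp ++ [i], []) := by
        simp [stepScanB, hi, hkill wh (fun x hx => hwh x hx i List.mem_cons_self)]
      rw [hstep]
      exact ih res (wp ++ [i]) [] hsort.2 (hnew wp hwp) (by simp)

-- ===== VERDICT (by name: the statement is the Claim_ definition above) =====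
theorem solution1_spec : Claim_equal_solution1 := by
  intro N K place _ _
  unfold Spec_solution1 solution1 solution1_alt buildHeapsA
  rw [buildA_eq (fun i => PySem.Str.pyGet? place i == some 'H')
      (PySem.List.pyRange 0 N 1) (PySem.List.pairwise_lt_pyRange_one 0 N)
      [] [] (by simp) (by simp)]
  by_cases hK : 0 ≤ K
  · rw [scanB_eq K hK (fun i => PySem.Str.pyGet? place i == some 'H')
        (PySem.List.pyRange 0 N 1) 0 [] []
        (PySem.List.pairwise_lt_pyRange_one 0 N) (by simp) (by simp) (Or.inl rfl)]
    simp
  · have hK' : K < 0 := by omega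
    rw [scanB_neg K hK' (fun i => PySem.Str.pyGet? place i == some 'H')
        (PySem.List.pyRange 0 N 1) 0 [] []
        (PySem.List.pairwise_lt_pyRange_one 0 N) (by simp) (by simp)]
    simp [outerA_neg K hK']
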